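-- pv_equiv track=rewrite | github.com/CorentinMary/scholar-sync | src/utils.py | remove_section_indicator
-- ===== SOURCE A (Python) =====
-- from typing import List
--
-- def trim_leading_whitespace(string: str) -> str:
--     """Removes the whitespace(s) at the beginning of a string
--
--     :param string: str.
--         string to trim.
--     :return: trimmed string.
--     """
--     # stopping when the string is empty or doesn't start with a whitespace/new line
--     if len(string) == 0 or string[0] not in [" ", "\n"]:
--         return string
--     else:
--         return trim_leading_whitespace(string[1:])
--
-- def remove_section_indicator(
--     text: str, indicator_list: List[str] = ["ABSTRACT", "TITLE PARAGRAPH:", "DESCRIPTION TABLE:"]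
-- ) -> str:
--     """Returns a text without words indicating the beginning of a section.
--
--     :param text: str.
--         text to remove indicators from.
--     :param indicator_list: List[str], defaults to ["ABSTRACT", "TITLE PARAGRAPH:", "DESCRIPTION TABLE:"].
--         list of words indicating the beginning of a section
--     :return: text without indicators.
--     """
--     text_ = trim_leading_whitespace(text)
--     for indicator in indicator_list:
--         if text_.startswith(indicator):
--             text_ = text_[len(indicator) :]
--             break
--
--     return trim_leading_whitespace(text_)
-- ===== SOURCE B (Python) =====
-- def remove_section_indicator(
--     text, indicator_list=["ABSTRACT", "TITLE PARAGRAPH:", "DESCRIPTION TABLE:"]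
-- ):
--     t = text.lstrip(" \n")
--     ind = next((i for i in indicator_list if t.startswith(i)), "")
--     return t[len(ind):].lstrip(" \n")
-- ===== Notes on version B (the rewrite author's own statement) =====
-- stated objective: idiomatic
-- what changed: Replaces the character-by-character recursive trim and the explicit for-loop with break by two built-in lstrip(" \n") calls and a single next() over a generator that picks the first matching indicator.
import Mathlib
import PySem

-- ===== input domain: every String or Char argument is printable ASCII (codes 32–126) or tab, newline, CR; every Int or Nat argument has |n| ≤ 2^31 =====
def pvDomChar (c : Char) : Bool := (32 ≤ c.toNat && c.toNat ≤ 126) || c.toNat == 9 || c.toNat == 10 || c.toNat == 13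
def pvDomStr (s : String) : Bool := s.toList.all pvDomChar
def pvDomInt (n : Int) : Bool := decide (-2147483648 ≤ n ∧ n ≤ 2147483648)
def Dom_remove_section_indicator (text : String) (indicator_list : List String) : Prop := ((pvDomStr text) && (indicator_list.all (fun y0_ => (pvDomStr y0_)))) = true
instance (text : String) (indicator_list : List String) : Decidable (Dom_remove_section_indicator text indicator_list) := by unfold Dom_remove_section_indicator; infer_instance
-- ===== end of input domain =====

-- B replaces A's recursive char trim + explicit break-loop by built-in lstrip and a first-match selection (idiomatic, same cost).


-- ===== PORT A =====
-- trim_leading_whitespace: recursion 'if empty or s[0] not in [" ","\n"] then s else recurse on s[1:]'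
def trim_leading_whitespace (s : List Char) : List Char :=
  match s with
  | [] => []
  | c :: rest => if ¬ (c = ' ' ∨ c = '\n') then c :: rest else trim_leading_whitespace rest

-- the 'for indicator in indicator_list: if startswith: slice; break' loop
def pvIndLoopA (t : List Char) : List String → List Char
  | [] => t
  | ind :: rest =>
      if PySem.Chars.startswith t ind.toList then t.drop ind.toList.length
      else pvIndLoopA t rest

def remove_section_indicator (text : String) (indicator_list : List String) : String :=
  let t_ := trim_leading_whitespace text.toList
  String.mk (trim_leading_whitespace (pvIndLoopA t_ indicator_list))

-- ===== PORT B =====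
-- text.lstrip(" \n")
def pvLstripB (cs : List Char) : List Char := cs.dropWhile (fun c => c == ' ' || c == '\n')

def remove_section_indicator_alt (text : String) (indicator_list : List String) : String :=
  let t := pvLstripB text.toList
  let ind := ((indicator_list.find? (fun i => PySem.Chars.startswith t i.toList)).getD "").toList
  String.mk (pvLstripB (t.drop ind.length))

-- ===== PRECONDITION & SPEC =====
def Spec_remove_section_indicator (text : String) (indicator_list : List String) (out : String) : Prop := out = remove_section_indicator_alt text indicator_list
instance (text : String) (indicator_list : List String) (out : String) : Decidable (Spec_remove_section_indicator text indicator_list out) := by unfold Spec_remove_section_indicator; infer_instance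

-- ===== CLAIM (what is proved, stated in full; the proofs are below) =====
def Claim_equal_remove_section_indicator : Prop := ∀ (text : String) (indicator_list : List String), Dom_remove_section_indicator text indicator_list → Spec_remove_section_indicator text indicator_list (remove_section_indicator text indicator_list)

-- ===== LEMMAS AND PROOFS =====
theorem trim_eq_lstrip (s : List Char) : trim_leading_whitespace s = pvLstripB s := by
  induction s with
  | nil => rfl
  | cons c rest ih =>
      simp only [trim_leading_whitespace, pvLstripB, List.dropWhile_cons]
      by_cases h : c = ' ' ∨ c = '\n'
      · rcases h with h | h <;> subst h <;> simp_all [pvLstripB]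
      · have hc : (c == ' ' || c == '\n') = false := by
          simp only [Bool.or_eq_false_iff, beq_eq_false_iff_ne]
          exact ⟨fun h1 => h (Or.inl h1), fun h2 => h (Or.inr h2)⟩
        simp [h, hc]

theorem loop_eq_find (t : List Char) (l : List String) :
    pvIndLoopA t l = t.drop ((l.find? (fun i => PySem.Chars.startswith t i.toList)).getD "").toList.length := by
  induction l with
  | nil => simp [pvIndLoopA]
  | cons ind rest ih =>
      simp only [pvIndLoopA, List.find?_cons]
      by_cases h : PySem.Chars.startswith t ind.toList
      · simp [h]
      · simp only [Bool.not_eq_true] at h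
        simp [h, ih]

-- ===== VERDICT (by name: the statement is the Claim_ definition above) =====
theorem remove_section_indicator_spec : Claim_equal_remove_section_indicator := by
  intro text indicator_list _
  unfold Spec_remove_section_indicator remove_section_indicator remove_section_indicator_alt
  simp only [trim_eq_lstrip, loop_eq_find]
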